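-- pv_equiv track=rewrite | github.com/mikamo3/python_sandbox | atcoder/abc256/filling_3x3_array.py | func
-- ===== SOURCE A (Python) =====
-- def func(h1: int, h2: int, h3: int, w1: int, w2: int, w3: int):
--     """
--     >>> func(3,4,6,3,3,7)
--     1
--     >>> func(5,13,10,6,13,9)
--     120
--     >>> func(20,25,30,22,29,24)
--     30613
--     """
--     cnt = 0
--     h1arr = ps(h1)
--     h2arr = ps(h2)
--     for x in h1arr:
--         for x2 in h2arr:
--             x3 = [w1-(x[0]+x2[0]), w2 - (x[1]+x2[1]), w3-(x[2]+x2[2])]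
--             if x3[0] > 0 and x3[1] > 0 and x3[2] > 0 and x3[0]+x3[1]+x3[2] == h3:
--                 cnt = cnt+1
--     return cnt
--
-- def ps(h: int):
--     arr = []
--     for x in range(1, h):
--         for y in range(1, h-x):
--             arr.append([x, y, h-x-y])
--     return arr
-- ===== SOURCE B (Python) =====
-- def func(h1: int, h2: int, h3: int, w1: int, w2: int, w3: int):
--     # Fast exact count: row3 sums to w1+w2+w3-h1-h2 for every choice, so if that
--     # is not h3 the answer is 0; otherwise, for each row1 composition (x,y,z) and
--     # each first entry a of row2, the valid middle entries b form an interval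
--     # counted in O(1), eliminating A's innermost loop.
--     if w1 + w2 + w3 - h1 - h2 != h3:
--         return 0
--     cnt = 0
--     for x in range(1, h1):
--         for y in range(1, h1 - x):
--             z = h1 - x - y
--             for a in range(1, h2):
--                 if w1 - x - a > 0:
--                     lo = max(1, h2 - a - w3 + z + 1)
--                     hi = min(h2 - a - 1, w2 - y - 1)
--                     if hi >= lo:
--                         cnt += hi - lo + 1
--     return cnt
-- ===== Notes on version B (the rewrite author's own statement) =====
-- stated objective: faster
-- what changed: B returns 0 immediately unless w1+w2+w3-h1-h2 == h3 (the row-3 sum is forced), and replaces A's enumeration of all row-2 compositions by ranging only over row-2's first entry and counting the valid middle entries as a closed-form interval length, eliminating the innermost loop.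
import Mathlib
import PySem

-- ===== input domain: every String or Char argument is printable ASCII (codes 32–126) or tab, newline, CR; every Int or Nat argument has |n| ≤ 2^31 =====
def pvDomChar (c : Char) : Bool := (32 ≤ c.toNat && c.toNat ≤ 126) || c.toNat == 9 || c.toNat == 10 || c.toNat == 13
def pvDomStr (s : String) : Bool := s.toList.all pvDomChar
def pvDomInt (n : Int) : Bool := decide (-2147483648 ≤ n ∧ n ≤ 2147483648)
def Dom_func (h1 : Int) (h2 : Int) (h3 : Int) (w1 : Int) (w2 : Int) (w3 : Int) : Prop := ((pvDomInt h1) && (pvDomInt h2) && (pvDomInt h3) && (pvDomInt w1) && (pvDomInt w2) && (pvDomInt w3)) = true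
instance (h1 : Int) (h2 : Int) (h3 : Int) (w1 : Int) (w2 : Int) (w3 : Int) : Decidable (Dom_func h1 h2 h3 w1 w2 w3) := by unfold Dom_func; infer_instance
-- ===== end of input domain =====

-- B short-circuits on the forced row-3 total and counts valid row-2 middle entries by a
-- closed-form interval length, eliminating A's innermost loop (faster: O(h1^2*h2) vs O(h1^2*h2^2)).

-- ===== PORT A =====
-- Python helper `ps(h)`: all compositions of h into 3 positive parts, as triples.
def ps (h : Int) : List (Int × Int × Int) :=
  (PySem.List.pyRange 1 h 1).foldl
    (fun arr x =>
      (PySem.List.pyRange 1 (h - x) 1).foldl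
        (fun arr y => arr ++ [(x, y, h - x - y)]) arr) []

def func (h1 : Int) (h2 : Int) (h3 : Int) (w1 : Int) (w2 : Int) (w3 : Int) : Int :=
  (ps h1).foldl
    (fun cnt x =>
      (ps h2).foldl
        (fun cnt x2 =>
          let x3 : Int × Int × Int :=
            (w1 - (x.1 + x2.1), w2 - (x.2.1 + x2.2.1), w3 - (x.2.2 + x2.2.2))
          if x3.1 > 0 ∧ x3.2.1 > 0 ∧ x3.2.2 > 0 ∧ x3.1 + x3.2.1 + x3.2.2 = h3 then
            cnt + 1
          else cnt) cnt) 0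

-- ===== PORT B =====
def func_alt (h1 : Int) (h2 : Int) (h3 : Int) (w1 : Int) (w2 : Int) (w3 : Int) : Int :=
  if w1 + w2 + w3 - h1 - h2 ≠ h3 then 0
  else
    (PySem.List.pyRange 1 h1 1).foldl
      (fun cnt x =>
        (PySem.List.pyRange 1 (h1 - x) 1).foldl
          (fun cnt y =>
            let z := h1 - x - y
            (PySem.List.pyRange 1 h2 1).foldl
              (fun cnt a =>
                if w1 - x - a > 0 then
                  let lo := max 1 (h2 - a - w3 + z + 1)
                  let hi := min (h2 - a - 1) (w2 - y - 1)
                  if hi ≥ lo then cnt + (hi - lo + 1) else cnt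
                else cnt) cnt) cnt) 0

-- ===== PRECONDITION & SPEC =====
def Spec_func (h1 : Int) (h2 : Int) (h3 : Int) (w1 : Int) (w2 : Int) (w3 : Int) (out : Int) : Prop := out = func_alt h1 h2 h3 w1 w2 w3
instance (h1 : Int) (h2 : Int) (h3 : Int) (w1 : Int) (w2 : Int) (w3 : Int) (out : Int) : Decidable (Spec_func h1 h2 h3 w1 w2 w3 out) := by unfold Spec_func; infer_instance

-- ===== CLAIM (what is proved, stated in full; the proofs are below) =====
def Claim_equal_func : Prop := ∀ (h1 : Int) (h2 : Int) (h3 : Int) (w1 : Int) (w2 : Int) (w3 : Int), Dom_func h1 h2 h3 w1 w2 w3 → Spec_func h1 h2 h3 w1 w2 w3 (func h1 h2 h3 w1 w2 w3)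

-- ===== LEMMAS AND PROOFS =====

-- `ps h` is the flattened double range.
theorem ps_eq (h : Int) :
    ps h = (PySem.List.pyRange 1 h 1).flatMap
      (fun x => (PySem.List.pyRange 1 (h - x) 1).map (fun y => (x, y, h - x - y))) := by
  unfold ps
  simp only [PySem.List.foldl_append_singleton_eq_map]
  rw [PySem.List.foldl_append_eq_flatMap]
  simp

-- The innermost loop of A, for fixed x, y, a, in closed form.
theorem innerA (h1 h2 h3 w1 w2 w3 x y a : Int) : ∀ (m s c : Int),
    (PySem.List.pyRange s m 1).foldl
      (fun cnt b =>
        if w1 - (x + a) > 0 ∧ w2 - (y + b) > 0 ∧ w3 - ((h1 - x - y) + (h2 - a - b)) > 0 ∧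
            (w1 - (x + a)) + (w2 - (y + b)) + (w3 - ((h1 - x - y) + (h2 - a - b))) = h3 then
          cnt + 1
        else cnt) c
    = c + if w1 - (x + a) > 0 ∧ w1 + w2 + w3 - h1 - h2 = h3 then
        max 0 (min (m - 1) (w2 - y - 1) - max s (h2 - a - w3 + (h1 - x - y) + 1) + 1)
      else 0 := by
  intro m
  have key : ∀ (n : Nat), ∀ (s c : Int), (m - s).toNat = n →
      (PySem.List.pyRange s m 1).foldl
        (fun cnt b =>
          if w1 - (x + a) > 0 ∧ w2 - (y + b) > 0 ∧ w3 - ((h1 - x - y) + (h2 - a - b)) > 0 ∧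
              (w1 - (x + a)) + (w2 - (y + b)) + (w3 - ((h1 - x - y) + (h2 - a - b))) = h3 then
            cnt + 1
          else cnt) c
      = c + if w1 - (x + a) > 0 ∧ w1 + w2 + w3 - h1 - h2 = h3 then
          max 0 (min (m - 1) (w2 - y - 1) - max s (h2 - a - w3 + (h1 - x - y) + 1) + 1)
        else 0 := by
    intro n
    induction n with
    | zero =>
      intro s c hn
      rw [PySem.List.pyRange_one_eq_nil (by omega)]
      simp only [List.foldl_nil]
      split_ifs <;> omega
    | succ n ih =>
      intro s c hn
      rw [PySem.List.pyRange_one_cons (by omega)]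
      simp only [List.foldl_cons]
      rw [ih (s + 1) _ (by omega)]
      split_ifs <;> omega
  exact fun s c => key (m - s).toNat s c rfl

theorem func_eq_ranges (h1 h2 h3 w1 w2 w3 : Int) :
    func h1 h2 h3 w1 w2 w3
    = (PySem.List.pyRange 1 h1 1).foldl
        (fun cnt x =>
          (PySem.List.pyRange 1 (h1 - x) 1).foldl
            (fun cnt y =>
              (PySem.List.pyRange 1 h2 1).foldl
                (fun cnt a =>
                  (PySem.List.pyRange 1 (h2 - a) 1).foldl
                    (fun cnt b =>
                      if w1 - (x + a) > 0 ∧ w2 - (y + b) > 0 ∧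
                          w3 - ((h1 - x - y) + (h2 - a - b)) > 0 ∧
                          (w1 - (x + a)) + (w2 - (y + b)) +
                            (w3 - ((h1 - x - y) + (h2 - a - b))) = h3 then
                        cnt + 1
                      else cnt) cnt) cnt) cnt) 0 := by
  unfold func
  rw [ps_eq h1, ps_eq h2]
  simp only [List.foldl_flatMap, List.foldl_map]

theorem func_spec_plain (h1 h2 h3 w1 w2 w3 : Int) :
    func h1 h2 h3 w1 w2 w3 = func_alt h1 h2 h3 w1 w2 w3 := by
  rw [func_eq_ranges]
  unfold func_alt
  by_cases hw : w1 + w2 + w3 - h1 - h2 = h3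
  · rw [if_neg (by omega)]
    refine PySem.List.foldl_congr_mem _ _ _ _ (fun cx x _ => ?_)
    refine PySem.List.foldl_congr_mem _ _ _ _ (fun cy y _ => ?_)
    refine PySem.List.foldl_congr_mem _ _ _ _ (fun ca a _ => ?_)
    rw [innerA]
    show _ = (if w1 - x - a > 0 then
        if min (h2 - a - 1) (w2 - y - 1) ≥ max 1 (h2 - a - w3 + (h1 - x - y) + 1) then
          ca + (min (h2 - a - 1) (w2 - y - 1) - max 1 (h2 - a - w3 + (h1 - x - y) + 1) + 1)
        else ca
      else ca)
    split_ifs <;> omega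
  · rw [if_pos (by omega)]
    -- every indicator is false since the forced row-3 total differs from h3
    have step : ∀ (x y a : Int) (c : Int),
        (PySem.List.pyRange 1 (h2 - a) 1).foldl
          (fun cnt b =>
            if w1 - (x + a) > 0 ∧ w2 - (y + b) > 0 ∧
                w3 - ((h1 - x - y) + (h2 - a - b)) > 0 ∧
                (w1 - (x + a)) + (w2 - (y + b)) +
                  (w3 - ((h1 - x - y) + (h2 - a - b))) = h3 then
              cnt + 1
            else cnt) c = c := by
      intro x y a c
      rw [innerA]
      rw [if_neg (by omega)]
      omega
    refine Eq.trans (PySem.List.foldl_congr_mem _ _ (fun cnt _ => cnt) _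
      (fun cx x _ => ?_)) (PySem.List.foldl_ignore ..)
    refine Eq.trans (PySem.List.foldl_congr_mem _ _ (fun cnt _ => cnt) _
      (fun cy y _ => ?_)) (PySem.List.foldl_ignore ..)
    refine Eq.trans (PySem.List.foldl_congr_mem _ _ (fun cnt _ => cnt) _
      (fun ca a _ => ?_)) (PySem.List.foldl_ignore ..)
    exact step ..

-- ===== VERDICT (by name: the statement is the Claim_ definition above) =====
theorem func_spec : Claim_equal_func := by
  intro h1 h2 h3 w1 w2 w3 _
  exact func_spec_plain h1 h2 h3 w1 w2 w3
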